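-- pv_equiv track=rewrite | github.com/nathaliaceretta/Algorithms | pistoleiros/seats/seats.py | arrange3
-- ===== SOURCE A (Python) =====
-- def arrange3(elements):
--     solutions = set()  # Conjunto para armazenar as soluções
--     if len(elements) == 1:
--         solutions.add(elements[0])  # Adiciona o único elemento quando a lista tem apenas um item
--     else:
--         for i in range(len(elements)):
--             element = elements.pop(i)  # Remove o elemento atualujm
--             # Chamada recursiva
--             sub_solutions = arrange3(elements)  # Chama a função recursivamente
--             for solution in sub_solutions:
--                 solutions.add(element + solution)  # Concatena o elemento atual com as soluções retornadas
--             elements.insert(i, element)  # Restaura o elemento na posição correta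
--     return solutions
-- ===== SOURCE B (Python) =====
-- def arrange3(elements):
--     # Bottom-up dynamic programming over index subsets: table[mask] is the set of
--     # concatenations of all orderings of the elements whose indices are in mask.
--     # A mask's sub-masks are numerically smaller, so one increasing pass fills the table.
--     n = len(elements)
--     if n == 0:
--         return set()
--     table = {}
--     for mask in range(1, 1 << n):
--         bits = [i for i in range(n) if (mask >> i) & 1]
--         if len(bits) == 1:
--             table[mask] = {elements[bits[0]]}
--         else:
--             s = set()
--             for i in bits:
--                 for sub in table[mask & ~(1 << i)]:
--                     s.add(elements[i] + sub)
--             table[mask] = s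
--     return table[(1 << n) - 1]
-- ===== Notes on version B (the rewrite author's own statement) =====
-- stated objective: alternative
-- what changed: Replaces the recursive pop/insert backtracking builder (which recomputes every sub-permutation set from scratch) with an iterative bottom-up dynamic program over index-subset bitmasks: table[mask] holds the concatenations of all orderings of the elements whose indices lie in mask.
import Mathlib
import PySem

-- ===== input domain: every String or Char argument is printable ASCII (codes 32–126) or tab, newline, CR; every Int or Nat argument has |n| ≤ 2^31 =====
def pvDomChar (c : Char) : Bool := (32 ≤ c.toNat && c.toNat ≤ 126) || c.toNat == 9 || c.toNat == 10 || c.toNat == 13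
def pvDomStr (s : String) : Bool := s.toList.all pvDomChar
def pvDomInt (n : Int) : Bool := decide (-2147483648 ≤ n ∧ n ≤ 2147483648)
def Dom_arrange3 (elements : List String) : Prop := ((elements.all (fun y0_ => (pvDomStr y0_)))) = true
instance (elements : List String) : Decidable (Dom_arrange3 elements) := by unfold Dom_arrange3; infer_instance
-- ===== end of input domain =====

-- B replaces A's recursive pop/insert backtracking set builder (which recomputes every
-- sub-permutation set from scratch) by an iterative bottom-up dynamic program over
-- index-subset bitmasks. A mutates `elements` in place (pop then insert restores it);
-- the equivalence proved here is about the return value, which that net-unchanged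
-- mutation does not affect.

-- ===== PORT A =====
-- elements.pop(i) on a list of length n with 0 ≤ i < n yields (elements[i], elements
-- with index i removed); elements.insert(i, element) then restores the original list,
-- so each iteration sees the original `elements` — transcribed value-for-value below.
def arrange3 (elements : List String) : List String :=
  if elements.length = 1 then
    PySem.Set.add PySem.Set.empty (elements.headD "")  -- solutions.add(elements[0])
  else
    (List.range elements.length).attach.foldl
      (fun solutions i =>
        let element := elements.getD i.1 ""            -- element = elements.pop(i) (the value)
        let rest := elements.eraseIdx i.1              -- the list after the pop
        let sub_solutions := arrange3 rest             -- recursive call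
        sub_solutions.foldl
          (fun s solution => PySem.Set.add s (element ++ solution)) solutions)
      PySem.Set.empty
termination_by elements.length
decreasing_by
  have hi : i.1 < elements.length := List.mem_range.mp i.2
  have : elements.length ≠ 0 := by omega
  simp [List.length_eraseIdx, hi]; omega

-- ===== PORT B =====
-- one iteration of Source B's `for mask in range(1, 1 << n)` loop body; `m` is the
-- range-over-`2^n - 1` index, so `mask = m + 1`.  `(mask >> i) & 1` is Nat.testBit;
-- `mask & ~(1 << i)` is taken at a mask whose bit i is set, where it equals
-- `mask ^^^ (1 <<< i)` (Nat has no complement).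
def pvStep (elements : List String) (table : PySem.Dict Nat (List String)) (m : Nat) :
    PySem.Dict Nat (List String) :=
  let mask := m + 1
  let bits := (List.range elements.length).filter (fun i => Nat.testBit mask i)
  if bits.length = 1 then
    table.insert mask (PySem.Set.add PySem.Set.empty (elements.getD (bits.getD 0 0) ""))
  else
    table.insert mask
      (bits.foldl
        (fun s i =>
          (table.getD (mask ^^^ (1 <<< i)) []).foldl
            (fun s sub => PySem.Set.add s (elements.getD i "" ++ sub)) s)
        PySem.Set.empty)

def arrange3_alt (elements : List String) : List String :=
  if elements.length = 0 then PySem.Set.empty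
  else
    ((List.range (2 ^ elements.length - 1)).foldl (pvStep elements) PySem.Dict.empty)
      |>.getD (2 ^ elements.length - 1) []

-- ===== PRECONDITION & SPEC =====
def Spec_arrange3 (elements : List String) (out : List String) : Prop := out = arrange3_alt elements
instance (elements : List String) (out : List String) : Decidable (Spec_arrange3 elements out) := by unfold Spec_arrange3; infer_instance

-- ===== CLAIM (what is proved, stated in full; the proofs are below) =====
def Claim_equal_arrange3 : Prop := ∀ (elements : List String), Dom_arrange3 elements → Spec_arrange3 elements (arrange3 elements)

-- ===== LEMMAS AND PROOFS =====

-- the sublist of `l` picked out by a list of indices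
def pvSubL (l : List String) (bits : List Nat) : List String := bits.map (fun i => l.getD i "")

-- the indices below n whose bit is set in mask
def pvBits (n mask : Nat) : List Nat := (List.range n).filter (fun i => Nat.testBit mask i)

theorem pv_nodup_pvBits (n mask : Nat) : (pvBits n mask).Nodup :=
  (List.nodup_range).filter _

theorem pv_mem_pvBits {n mask i : Nat} : i ∈ pvBits n mask ↔ i < n ∧ Nat.testBit mask i := by
  simp [pvBits, List.mem_filter, List.mem_range]

theorem pv_pvBits_zero (n : Nat) : pvBits n 0 = [] := by
  simp [pvBits, Nat.zero_testBit]

theorem pv_eraseIdx_eq_erase : ∀ (l : List Nat), l.Nodup → ∀ (j : Nat) (hj : j < l.length),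
    l.eraseIdx j = l.erase l[j] := by
  intro l
  induction l with
  | nil => intro _ j hj; simp at hj
  | cons a t ih =>
    intro hnd j hj
    cases j with
    | zero => simp
    | succ j =>
      have hj' : j < t.length := by simpa using hj
      have hne : a ≠ t[j] := by
        intro h
        exact (List.nodup_cons.mp hnd).1 (h ▸ t.getElem_mem hj')
      simp only [List.eraseIdx_cons_succ, List.getElem_cons_succ]
      rw [List.erase_cons_tail (by simpa using fun h => hne h)]
      rw [ih (List.nodup_cons.mp hnd).2 j hj']

theorem pv_filter_erase : ∀ (L : List Nat), L.Nodup → ∀ (p q : Nat → Bool) (i : Nat),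
    q i = false → p i = true → (∀ j, j ≠ i → q j = p j) →
    L.filter q = (L.filter p).erase i := by
  intro L
  induction L with
  | nil => intro _ p q i _ _ _; simp
  | cons a t ih =>
    intro hnd p q i hq hp hpq
    have hnd' := (List.nodup_cons.mp hnd).2
    by_cases ha : a = i
    · subst ha
      rw [List.filter_cons_of_neg (by simp [hq]), List.filter_cons_of_pos (by simp [hp])]
      rw [List.erase_cons_head]
      apply List.filter_congr
      intro j hj
      exact hpq j (fun h => (List.nodup_cons.mp hnd).1 (h ▸ hj))
    · have hqa : q a = p a := hpq a ha
      by_cases hpa : p a = true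
      · rw [List.filter_cons_of_pos (by simp [hqa, hpa]), List.filter_cons_of_pos (by simp [hpa])]
        rw [List.erase_cons_tail (by simpa using fun h => ha h)]
        rw [ih hnd' p q i hq hp hpq]
      · rw [List.filter_cons_of_neg (by simp [hqa]; simpa using hpa),
            List.filter_cons_of_neg (by simpa using hpa)]
        exact ih hnd' p q i hq hp hpq

theorem pv_pvBits_xor (n mask i : Nat) (hi : Nat.testBit mask i) :
    pvBits n (mask ^^^ 2 ^ i) = (pvBits n mask).erase i := by
  apply pv_filter_erase _ List.nodup_range
  · simp [Nat.testBit_xor, hi]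
  · exact hi
  · intro j hj
    have hne : ¬ i = j := fun h => hj h.symm
    simp [Nat.testBit_xor, hne]

theorem pv_xor_lt (mask i : Nat) (hi : Nat.testBit mask i) : mask ^^^ 2 ^ i < mask := by
  apply Nat.lt_of_testBit i
  · simp [Nat.testBit_xor, hi]
  · exact hi
  · intro j hj
    have hne : ¬ i = j := by omega
    simp [Nat.testBit_xor, hne]

-- fold over range-of-indices reading bits[j] = fold over bits itself
theorem pv_foldl_range_getD {β : Type} : ∀ (bits : List Nat) (G : β → Nat → β) (init : β),
    (List.range bits.length).foldl (fun s j => G s (bits.getD j 0)) init = bits.foldl G init := by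
  intro bits
  induction bits using List.reverseRecOn with
  | nil => intro G init; simp
  | append_singleton ys y ih =>
    intro G init
    rw [List.length_append, List.length_singleton, List.range_succ, List.foldl_append,
        List.foldl_append]
    have h1 : (List.range ys.length).foldl (fun s j => G s ((ys ++ [y]).getD j 0)) init
        = (List.range ys.length).foldl (fun s j => G s (ys.getD j 0)) init := by
      apply PySem.List.foldl_congr_mem
      intro acc j hj
      rw [List.getD_append _ _ _ _ (List.mem_range.mp hj)]
    rw [h1, ih]
    have hy : (ys ++ [y]).getD ys.length 0 = y := by
      rw [List.getD_eq_getElem _ _ (by simp)]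
      simp
    simp only [List.foldl_cons, List.foldl_nil]
    rw [hy]

-- A's recursion over the sublist picked by a nodup index list, restructured as a fold
-- over the index list itself (valid in both non-singleton branches: length 0 and ≥ 2)
theorem pv_A_unfold (l : List String) (bits : List Nat) (hnd : bits.Nodup)
    (hlen : bits.length ≠ 1) :
    arrange3 (pvSubL l bits)
      = bits.foldl
          (fun sols i =>
            (arrange3 (pvSubL l (bits.erase i))).foldl
              (fun s sol => PySem.Set.add s (l.getD i "" ++ sol)) sols)
          PySem.Set.empty := by
  have hlen' : (pvSubL l bits).length = bits.length := by simp [pvSubL]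
  have h0 : arrange3 (pvSubL l bits)
      = (List.range bits.length).foldl
          (fun solutions j =>
            (arrange3 ((pvSubL l bits).eraseIdx j)).foldl
              (fun s sol => PySem.Set.add s ((pvSubL l bits).getD j "" ++ sol)) solutions)
          PySem.Set.empty := by
    rw [arrange3, if_neg (by simpa [pvSubL] using hlen), hlen']
    exact @List.foldl_attach _ _ (List.range bits.length)
      (fun solutions j =>
        (arrange3 ((pvSubL l bits).eraseIdx j)).foldl
          (fun s sol => PySem.Set.add s ((pvSubL l bits).getD j "" ++ sol)) solutions)
      PySem.Set.empty
  rw [h0]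
  have h1 : (List.range bits.length).foldl
      (fun solutions j =>
        (arrange3 ((pvSubL l bits).eraseIdx j)).foldl
          (fun s sol => PySem.Set.add s ((pvSubL l bits).getD j "" ++ sol)) solutions)
      PySem.Set.empty
      = (List.range bits.length).foldl
      (fun solutions j =>
        (arrange3 (pvSubL l (bits.erase (bits.getD j 0)))).foldl
          (fun s sol => PySem.Set.add s (l.getD (bits.getD j 0) "" ++ sol)) solutions)
      PySem.Set.empty := by
    apply PySem.List.foldl_congr_mem
    intro acc j hj
    have hjlt : j < bits.length := List.mem_range.mp hj
    have hget : (pvSubL l bits).getD j "" = l.getD (bits.getD j 0) "" := by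
      rw [List.getD_eq_getElem _ _ (by simpa [pvSubL] using hjlt),
          List.getD_eq_getElem _ _ hjlt]
      simp [pvSubL]
    have herase : (pvSubL l bits).eraseIdx j = pvSubL l (bits.erase (bits.getD j 0)) := by
      rw [pvSubL, List.eraseIdx_map, pv_eraseIdx_eq_erase bits hnd j hjlt,
          List.getD_eq_getElem _ _ hjlt]
      rfl
    rw [hget, herase]
  exact h1.trans (pv_foldl_range_getD bits
    (fun sols i =>
      (arrange3 (pvSubL l (bits.erase i))).foldl
        (fun s sol => PySem.Set.add s (l.getD i "" ++ sol)) sols)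
    PySem.Set.empty)

-- base case: A on a one-element sublist
theorem pv_A_singleton (l : List String) (i : Nat) :
    arrange3 (pvSubL l [i]) = PySem.Set.add PySem.Set.empty (l.getD i "") := by
  rw [arrange3]
  simp [pvSubL]

-- invariant of Source B's table-filling loop: after the masks 1..M are processed, the
-- table holds A's value on the corresponding index sublist for every one of them
theorem pv_inv (l : List String) : ∀ (M : Nat), M ≤ 2 ^ l.length - 1 →
    ∀ mask, 1 ≤ mask → mask ≤ M →
      ((List.range M).foldl (pvStep l) PySem.Dict.empty).getD mask []
        = arrange3 (pvSubL l (pvBits l.length mask)) := by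
  intro M
  induction M with
  | zero => intro _ mask h1 h2; omega
  | succ M ih =>
    intro hM mask h1 h2
    have hM' : M ≤ 2 ^ l.length - 1 := by omega
    rw [List.range_succ, List.foldl_append, List.foldl_cons, List.foldl_nil]
    by_cases hcase : mask ≤ M
    · -- an earlier entry: the new insert (key M+1 ≠ mask) does not touch it
      rw [pvStep]
      split_ifs with hb
      · rw [PySem.Dict.getD_insert, if_neg (by omega)]
        exact ih hM' mask h1 hcase
      · rw [PySem.Dict.getD_insert, if_neg (by omega)]
        exact ih hM' mask h1 hcase
    · -- the entry just written: mask = M + 1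
      have hmask : mask = M + 1 := by omega
      subst hmask
      have hlt : M + 1 < 2 ^ l.length := by
        have : 1 ≤ 2 ^ l.length := Nat.one_le_two_pow
        omega
      rw [pvStep]
      have hbits : (List.range l.length).filter (fun i => Nat.testBit (M + 1) i)
          = pvBits l.length (M + 1) := rfl
      split_ifs with hb
      · -- singleton sublist
        rw [PySem.Dict.getD_insert, if_pos rfl]
        rw [hbits] at hb ⊢
        obtain ⟨i, hi⟩ : ∃ i, pvBits l.length (M + 1) = [i] := by
          match h : pvBits l.length (M + 1), hb with
          | [i], _ => exact ⟨i, rfl⟩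
        rw [hi, pv_A_singleton]
        simp
      · rw [PySem.Dict.getD_insert, if_pos rfl]
        rw [hbits] at hb ⊢
        rw [pv_A_unfold l _ (pv_nodup_pvBits _ _) hb]
        apply PySem.List.foldl_congr_mem
        intro acc i hi
        have hmem := pv_mem_pvBits.mp hi
        have h2i : (1 <<< i) = 2 ^ i := Nat.one_shiftLeft i
        have hxor := pv_pvBits_xor l.length (M + 1) i hmem.2
        have hsub_lt : (M + 1) ^^^ 2 ^ i < M + 1 := pv_xor_lt _ _ hmem.2
        have hsub_ne : 1 ≤ (M + 1) ^^^ 2 ^ i := by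
          rcases Nat.eq_zero_or_pos ((M + 1) ^^^ 2 ^ i) with h0 | h0
          · exfalso
            have : pvBits l.length ((M + 1) ^^^ 2 ^ i) = [] := h0 ▸ pv_pvBits_zero _
            rw [hxor] at this
            have hlen := List.length_erase_of_mem hi
            rw [this] at hlen
            simp at hlen
            -- bits has length ≥ 2 in this branch (≠ 1 and nonempty since i ∈ bits)
            have : pvBits l.length (M + 1) ≠ [] := by
              intro h; rw [h] at hi; simp at hi
            have : 1 ≤ (pvBits l.length (M + 1)).length :=
              List.length_pos_iff.mpr this
            omega
          · exact h0
        rw [h2i, ih hM' _ hsub_ne (by omega), hxor]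

theorem pv_range_map_getD (l : List String) :
    pvSubL l (List.range l.length) = l := by
  apply List.ext_getElem
  · simp [pvSubL]
  · intro i h1 h2
    simp only [pvSubL, List.getElem_map, List.getElem_range]
    exact List.getD_eq_getElem l "" h2

theorem pv_main : ∀ (elements : List String), arrange3 elements = arrange3_alt elements := by
  intro l
  rw [arrange3_alt]
  by_cases h0 : l.length = 0
  · rw [if_pos h0]
    have : l = [] := List.length_eq_zero_iff.mp h0
    subst this
    rw [arrange3]
    simp
  · rw [if_neg h0]
    have h1 : 1 ≤ 2 ^ l.length - 1 := by
      have : 2 ^ 1 ≤ 2 ^ l.length := Nat.pow_le_pow_right (by omega) (by omega)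
      omega
    rw [pv_inv l (2 ^ l.length - 1) le_rfl (2 ^ l.length - 1) h1 le_rfl]
    have hbits : pvBits l.length (2 ^ l.length - 1) = List.range l.length := by
      apply List.filter_eq_self.mpr
      intro i hi
      simp [Nat.testBit_two_pow_sub_one, List.mem_range.mp hi]
    rw [hbits, pv_range_map_getD]

-- ===== VERDICT (by name: the statement is the Claim_ definition above) =====
theorem arrange3_spec : Claim_equal_arrange3 := by
  intro elements _
  unfold Spec_arrange3
  exact pv_main elements
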